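-- pv_equiv track=rewrite | github.com/mariamawitelias/A2SV_Solved_Questions | leetcode/0491-non-decreasing-subsequences/0491-non-decreasing-subsequences.py | findSubsequences
-- ===== SOURCE A (Python) =====
-- from typing import List
--
-- def findSubsequences(nums: List[int]) -> List[List[int]]:
--     res = []
--     def backtrack(i, comb):
--         if len(comb) > 1:
--             res.append(comb[:])
--         if i == len(nums):
--             return
--         exist = set()
--         for j in range(i, len(nums)):
--             if nums[j] in exist:
--                 continue
--             if comb:
--                 if nums[j] < comb[-1]:
--                     continue
--             comb.append(nums[j])
--             exist.add(nums[j])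
--             backtrack(j+1, comb)
--             comb.pop()
--     backtrack(0, [])
--     res.sort()
--     return res
-- ===== SOURCE B (Python) =====
-- def findSubsequences(nums):
--     # Iterative prefix-extension with a single ordered set of tuples (dict keys),
--     # instead of recursive backtracking with per-level dedup.
--     subs = {}  # ordered set: every distinct non-empty non-decreasing subsequence seen so far
--     for num in nums:
--         batch = [(num,)]
--         for sub in subs:
--             if num >= sub[-1]:
--                 batch.append(sub + (num,))
--         for t in batch:
--             subs[t] = None
--     return sorted(list(t) for t in subs if len(t) >= 2)
-- ===== Notes on version B (the rewrite author's own statement) =====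
-- stated objective: alternative
-- what changed: Replaced A's recursive backtracking with per-level duplicate sets by a single left-to-right pass that maintains one global insertion-ordered set of tuples and extends every stored non-decreasing subsequence with each new element, sorting the length>=2 members at the end.
import Mathlib
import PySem

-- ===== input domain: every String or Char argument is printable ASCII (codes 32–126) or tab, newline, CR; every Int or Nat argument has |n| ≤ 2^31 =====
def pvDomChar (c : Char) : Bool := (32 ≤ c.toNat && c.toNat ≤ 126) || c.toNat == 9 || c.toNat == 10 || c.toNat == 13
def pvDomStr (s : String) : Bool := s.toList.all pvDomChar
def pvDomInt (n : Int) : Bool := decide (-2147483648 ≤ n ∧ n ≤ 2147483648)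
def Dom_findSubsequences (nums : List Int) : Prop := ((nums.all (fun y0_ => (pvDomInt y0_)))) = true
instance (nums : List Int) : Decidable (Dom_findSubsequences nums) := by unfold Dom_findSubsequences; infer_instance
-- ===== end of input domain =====

-- B replaces A's recursive backtracking (per-level `exist` dedup sets) by an iterative
-- prefix-extension over one global insertion-ordered set of tuples; objective: alternative.

-- ===== PORT A =====
-- A's nested `backtrack` is the mutual pair btA (one call) / btLoop (the `for j in range(i, len)` loop);
-- `res` is threaded as an accumulator, `comb.append/pop` becomes passing `comb ++ [nums[j]]` down.
mutual
def btA (nums : List Int) (i : Nat) (comb : List Int) (res : List (List Int)) : List (List Int) :=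
  let res1 := if comb.length > 1 then res ++ [comb] else res
  if i = nums.length then res1
  else btLoop nums i comb PySem.Set.empty res1
termination_by (nums.length + 1 - i, 1)

def btLoop (nums : List Int) (j : Nat) (comb : List Int) (exist : PySem.Set Int) (res : List (List Int)) : List (List Int) :=
  if h : j < nums.length then
    if PySem.Set.contains exist nums[j] then btLoop nums (j+1) comb exist res
    else if (match comb.getLast? with | some l => decide (nums[j] < l) | none => false) then
      btLoop nums (j+1) comb exist res
    else btLoop nums (j+1) comb (PySem.Set.add exist nums[j]) (btA nums (j+1) (comb ++ [nums[j]]) res)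
  else res
termination_by (nums.length + 1 - j, 0)
end

def findSubsequences (nums : List Int) : List (List Int) :=
  PySem.List.sorted (btA nums 0 [] []) (fun x => x)

-- ===== PORT B =====
-- `subs` is the dict used as an ordered set of tuples; `batch` is the fresh extensions of this num.
def altStep (subs : PySem.Set (List Int)) (num : Int) : PySem.Set (List Int) :=
  let batch := [num] :: (subs.filter (fun sub => decide (sub.getLastD 0 ≤ num))).map (fun sub => sub ++ [num])
  PySem.Set.update subs batch

def findSubsequences_alt (nums : List Int) : List (List Int) :=
  let subs := nums.foldl altStep PySem.Set.empty
  PySem.List.sorted (subs.filter (fun t => decide (2 ≤ t.length))) (fun x => x)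

-- ===== PRECONDITION & SPEC =====
def Spec_findSubsequences (nums : List Int) (out : List (List Int)) : Prop := out = findSubsequences_alt nums
instance (nums : List Int) (out : List (List Int)) : Decidable (Spec_findSubsequences nums out) := by unfold Spec_findSubsequences; infer_instance

-- ===== CLAIM (what is proved, stated in full; the proofs are below) =====
def Claim_equal_findSubsequences : Prop := ∀ (nums : List Int), Dom_findSubsequences nums → Spec_findSubsequences nums (findSubsequences nums)

-- ===== LEMMAS AND PROOFS =====

-- the values A's btA starting at (i, comb) appends to res: comb extended by a non-decreasing
-- subsequence t of nums[i:], kept only when the whole list has length ≥ 2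
def ExtA (nums : List Int) (i : Nat) (comb x : List Int) : Prop :=
  ∃ t, t.Sublist (nums.drop i) ∧ x = comb ++ t ∧ x.Pairwise (· ≤ ·) ∧ 2 ≤ x.length

-- the values A's btLoop at column j appends: as ExtA but the extension is non-empty and its
-- first value is not yet in `exist`
def ExtL (nums : List Int) (j : Nat) (comb : List Int) (exist : List Int) (x : List Int) : Prop :=
  ∃ t, t.Sublist (nums.drop j) ∧ t ≠ [] ∧ t.headI ∉ exist ∧ x = comb ++ t ∧ x.Pairwise (· ≤ ·) ∧ 2 ≤ x.length

lemma forall_le_of_getLast? (l : List Int) (hp : l.Pairwise (· ≤ ·)) (lc v : Int)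
    (hlc : l.getLast? = some lc) (hle : lc ≤ v) : ∀ a ∈ l, a ≤ v := by
  induction l with
  | nil => simp
  | cons b t ih =>
    intro a ha
    rcases List.mem_cons.mp ha with rfl | hat
    · cases t with
      | nil =>
        simp at hlc; omega
      | cons c t' =>
        have hlc' : (c :: t').getLast? = some lc := by
          rw [← hlc]; exact (List.getLast?_cons_cons ..).symm
        have hmem : lc ∈ c :: t' := List.mem_of_getLast? hlc'
        have := (List.pairwise_cons.mp hp).1 lc hmem
        omega
    · cases t with
      | nil => simp at hat
      | cons c t' =>
        exact ih (List.pairwise_cons.mp hp).2 (by simpa using hlc) a hat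

lemma sublist_concat_iff (x p : List Int) (v : Int) :
    x.Sublist (p ++ [v]) ↔ x.Sublist p ∨ ∃ y, x = y ++ [v] ∧ y.Sublist p := by
  constructor
  · intro h
    have h' : x.reverse.Sublist (v :: p.reverse) := by simpa using h.reverse
    rcases List.sublist_cons_iff.mp h' with h2 | ⟨r, hr, hrs⟩
    · left
      have := h2.reverse; simpa using this
    · right
      refine ⟨r.reverse, ?_, by have := hrs.reverse; simpa using this⟩
      have : x.reverse.reverse = (v :: r).reverse := by rw [hr]
      simpa using this
  · rintro (h | ⟨y, rfl, hy⟩)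
    · exact h.trans (List.sublist_append_left _ _)
    · exact hy.append (List.Sublist.refl _)

-- for non-empty non-decreasing sub, A/B's `num >= sub[-1]` test characterises extendability
lemma pw_concat_iff (sub : List Int) (num : Int) (hne : sub ≠ []) (hp : sub.Pairwise (· ≤ ·)) :
    (sub ++ [num]).Pairwise (· ≤ ·) ↔ sub.getLastD 0 ≤ num := by
  obtain ⟨lc, hlc⟩ : ∃ lc, sub.getLast? = some lc := by
    cases h : sub.getLast? with
    | none => exact absurd (List.getLast?_eq_none_iff.mp h) hne
    | some lc => exact ⟨lc, rfl⟩
  have hD : sub.getLastD 0 = lc := by rw [List.getLastD_eq_getLast?, hlc]; rfl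
  rw [List.pairwise_append, hD]
  constructor
  · rintro ⟨-, -, h⟩
    exact h lc (List.mem_of_getLast? hlc) num (by simp)
  · intro h
    refine ⟨hp, by simp, ?_⟩
    intro a ha b hb
    rw [List.mem_singleton.mp hb]
    exact forall_le_of_getLast? sub hp lc num hlc h a ha

lemma bt_main (nums : List Int) : ∀ (n : Nat),
    (∀ i comb res, 2*(nums.length+1-i)+1 ≤ n → comb.Pairwise (· ≤ ·) →
      ∃ l, btA nums i comb res = res ++ l ∧ l.Nodup ∧ ∀ x, (x ∈ l ↔ ExtA nums i comb x)) ∧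
    (∀ j comb exist res, 2*(nums.length+1-j) ≤ n → comb.Pairwise (· ≤ ·) →
      ∃ l, btLoop nums j comb exist res = res ++ l ∧ l.Nodup ∧ ∀ x, (x ∈ l ↔ ExtL nums j comb exist x)) := by
  intro n
  induction n with
  | zero =>
    constructor
    · intro i comb res hm hp; omega
    · intro j comb exist res hm hp
      have hj : ¬ j < nums.length := by omega
      refine ⟨[], ?_, by simp, ?_⟩
      · rw [btLoop]; simp [hj]
      · intro x
        simp only [List.not_mem_nil, false_iff]
        rintro ⟨t, hsub, htne, -⟩
        rw [List.drop_eq_nil_of_le (by omega)] at hsub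
        exact htne (List.sublist_nil.mp hsub)
  | succ n ih =>
    obtain ⟨ihA, ihL⟩ := ih
    constructor
    · -- one call of backtrack
      intro i comb res hm hp
      by_cases hi : i = nums.length
      · subst hi
        refine ⟨if comb.length > 1 then [comb] else [], ?_, by split <;> simp, ?_⟩
        · rw [btA]
          rw [if_pos rfl]
          split <;> simp
        · intro x
          unfold ExtA
          rw [List.drop_length]
          constructor
          · intro hx
            have hx' : x = comb ∧ comb.length > 1 := by
              by_cases h2 : comb.length > 1 <;> simp [h2] at hx
              exact ⟨hx, h2⟩
            obtain ⟨rfl, h2⟩ := hx'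
            exact ⟨[], by simp, by simp, hp, by omega⟩
          · rintro ⟨t, hsub, hx, hpw, hlen⟩
            have ht : t = [] := List.sublist_nil.mp hsub
            subst ht
            simp only [List.append_nil] at hx
            have h2 : 1 < comb.length := by
              have := hlen; rw [hx] at this; simpa using this
            rw [if_pos h2]
            simp [hx]
      · obtain ⟨l2, hl2, hnd2, hmem2⟩ := ihL i comb PySem.Set.empty
            (if comb.length > 1 then res ++ [comb] else res) (by omega) hp
        refine ⟨(if comb.length > 1 then [comb] else []) ++ l2, ?_, ?_, ?_⟩
        · rw [btA]; simp only [if_neg hi]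
          rw [hl2]
          split <;> simp
        · rw [List.nodup_append]
          refine ⟨by split <;> simp, hnd2, ?_⟩
          intro a ha b hb
          have ha' : a = comb := by split at ha <;> simp_all
          obtain ⟨t, -, htne, -, hbx, -, -⟩ := (hmem2 b).mp hb
          subst ha'
          rw [hbx]
          intro hEq
          have hlenEq := congrArg List.length hEq
          simp at hlenEq
          exact htne hlenEq
        · intro x
          rw [List.mem_append, hmem2 x]
          unfold ExtA ExtL
          constructor
          · rintro (hx | ⟨t, hsub, htne, -, hx, hpw, hlen⟩)
            · have hx' : x = comb ∧ comb.length > 1 := by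
                by_cases h2 : comb.length > 1 <;> simp [h2] at hx
                exact ⟨hx, h2⟩
              obtain ⟨rfl, h2⟩ := hx'
              exact ⟨[], by simp, by simp, hp, by omega⟩
            · exact ⟨t, hsub, hx, hpw, hlen⟩
          · rintro ⟨t, hsub, hx, hpw, hlen⟩
            cases t with
            | nil =>
              left
              simp only [List.append_nil] at hx
              have h2 : 1 < comb.length := by
                have := hlen; rw [hx] at this; simpa using this
              rw [if_pos h2]
              simp [hx]
            | cons c t' =>
              right
              exact ⟨c :: t', hsub, by simp, by simp [PySem.Set.empty], hx, hpw, hlen⟩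
    · -- the for-j loop
      intro j comb exist res hm hp
      by_cases hj : j < nums.length
      · have hdrop : nums.drop j = nums[j] :: nums.drop (j+1) := List.drop_eq_getElem_cons hj
        by_cases hcont : PySem.Set.contains exist nums[j] = true
        · -- nums[j] already in exist: continue
          obtain ⟨l, hl, hnd, hmem⟩ := ihL (j+1) comb exist res (by omega) hp
          refine ⟨l, ?_, hnd, ?_⟩
          · rw [btLoop]; simp only [dif_pos hj, if_pos hcont, hl]
          · intro x
            rw [hmem x]
            unfold ExtL
            constructor
            · rintro ⟨t, hsub, htne, hth, hx, hpw, hlen⟩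
              exact ⟨t, by rw [hdrop]; exact hsub.cons _, htne, hth, hx, hpw, hlen⟩
            · rintro ⟨t, hsub, htne, hth, hx, hpw, hlen⟩
              rw [hdrop] at hsub
              rcases List.sublist_cons_iff.mp hsub with h2 | ⟨r, rfl, hrs⟩
              · exact ⟨t, h2, htne, hth, hx, hpw, hlen⟩
              · exact absurd ((PySem.Set.contains_iff _ _).mp hcont) (by simpa using hth)
        · by_cases hlt : (match comb.getLast? with | some l => decide (nums[j] < l) | none => false) = true
          · -- nums[j] < comb[-1]: continue
            obtain ⟨lc, hlc, hvlt⟩ : ∃ lc, comb.getLast? = some lc ∧ nums[j] < lc := by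
              cases hcl : comb.getLast? with
              | none => rw [hcl] at hlt; simp at hlt
              | some lc => rw [hcl] at hlt; exact ⟨lc, rfl, by simpa using hlt⟩
            obtain ⟨l, hl, hnd, hmem⟩ := ihL (j+1) comb exist res (by omega) hp
            refine ⟨l, ?_, hnd, ?_⟩
            · rw [btLoop]; simp only [dif_pos hj, if_neg hcont, if_pos hlt, hl]
            · intro x
              rw [hmem x]
              unfold ExtL
              constructor
              · rintro ⟨t, hsub, htne, hth, hx, hpw, hlen⟩
                exact ⟨t, by rw [hdrop]; exact hsub.cons _, htne, hth, hx, hpw, hlen⟩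
              · rintro ⟨t, hsub, htne, hth, hx, hpw, hlen⟩
                rw [hdrop] at hsub
                rcases List.sublist_cons_iff.mp hsub with h2 | ⟨r, rfl, hrs⟩
                · exact ⟨t, h2, htne, hth, hx, hpw, hlen⟩
                · exfalso
                  rw [hx] at hpw
                  have := (List.pairwise_append.mp hpw).2.2 lc (List.mem_of_getLast? hlc) nums[j] (by simp)
                  omega
          · -- extend comb with nums[j]
            have hnm : nums[j] ∉ exist := fun hmm =>
              hcont ((PySem.Set.contains_iff _ _).mpr hmm)
            have hple : ∀ a ∈ comb, a ≤ nums[j] := by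
              cases hcl : comb.getLast? with
              | none =>
                rw [List.getLast?_eq_none_iff] at hcl
                subst hcl; simp
              | some lc =>
                rw [hcl] at hlt
                simp only [decide_eq_true_eq] at hlt
                exact forall_le_of_getLast? comb hp lc _ hcl (by omega)
            have hpw2 : (comb ++ [nums[j]]).Pairwise (· ≤ ·) := by
              rw [List.pairwise_append]
              exact ⟨hp, by simp, fun a ha b hb => by rw [List.mem_singleton.mp hb]; exact hple a ha⟩
            obtain ⟨lA, hlA, hndA, hmemA⟩ := ihA (j+1) (comb ++ [nums[j]]) res (by omega) hpw2
            obtain ⟨lL, hlL, hndL, hmemL⟩ := ihL (j+1) comb (PySem.Set.add exist nums[j]) (res ++ lA) (by omega) hp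
            refine ⟨lA ++ lL, ?_, ?_, ?_⟩
            · rw [btLoop]
              simp only [dif_pos hj, if_neg hcont, if_neg hlt, hlA, hlL, List.append_assoc]
            · rw [List.nodup_append]
              refine ⟨hndA, hndL, ?_⟩
              intro a ha b hb
              obtain ⟨t, -, hax, -, -⟩ := (hmemA a).mp ha
              obtain ⟨u, -, hune, huh, hbx, -, -⟩ := (hmemL b).mp hb
              cases u with
              | nil => exact absurd rfl hune
              | cons c u' =>
                have hcv : c ≠ nums[j] := by
                  intro hc
                  exact huh ((PySem.Set.mem_add ..).mpr (Or.inr (by simpa using hc)))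
                intro hEq
                have ha' : a[comb.length]? = some nums[j] := by
                  rw [hax, List.append_assoc, List.getElem?_append_right (le_refl _)]
                  simp
                have hb' : b[comb.length]? = some c := by
                  rw [hbx, List.getElem?_append_right (le_refl _)]
                  simp
                rw [hEq, hb'] at ha'
                exact hcv (by simpa using ha')
            · intro x
              rw [List.mem_append, hmemA x, hmemL x]
              unfold ExtA ExtL
              constructor
              · rintro (⟨t, hsub, hx, hpw, hlen⟩ | ⟨t, hsub, htne, hth, hx, hpw, hlen⟩)
                · refine ⟨nums[j] :: t, ?_, by simp, by simpa using hnm,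
                    by rw [hx, List.append_assoc]; rfl, hpw, hlen⟩
                  rw [hdrop]
                  exact List.cons_sublist_cons.mpr hsub
                · refine ⟨t, by rw [hdrop]; exact hsub.cons _, htne, ?_, hx, hpw, hlen⟩
                  intro hmm
                  exact hth ((PySem.Set.mem_add ..).mpr (Or.inl hmm))
              · rintro ⟨t, hsub, htne, hth, hx, hpw, hlen⟩
                rw [hdrop] at hsub
                rcases List.sublist_cons_iff.mp hsub with h2 | ⟨r, rfl, hrs⟩
                · cases t with
                  | nil => exact absurd rfl htne
                  | cons c t' =>
                    by_cases hcv : c = nums[j]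
                    · subst hcv
                      left
                      refine ⟨t', (List.sublist_cons_self _ _).trans h2,
                        by rw [hx, List.append_assoc]; rfl, hpw, hlen⟩
                    · right
                      refine ⟨c :: t', h2, by simp, ?_, hx, hpw, hlen⟩
                      intro hmm
                      rcases (PySem.Set.mem_add ..).mp hmm with h | h
                      · exact hth (by simpa using h)
                      · exact hcv (by simpa using h)
                · left
                  refine ⟨r, hrs, by rw [hx, List.append_assoc]; rfl, hpw, hlen⟩
      · refine ⟨[], ?_, by simp, ?_⟩
        · rw [btLoop]; simp [hj]
        · intro x
          simp only [List.not_mem_nil, false_iff]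
          rintro ⟨t, hsub, htne, -⟩
          rw [List.drop_eq_nil_of_le (by omega)] at hsub
          exact htne (List.sublist_nil.mp hsub)

lemma alt_inv (nums : List Int) :
    (nums.foldl altStep PySem.Set.empty).Nodup ∧
    ∀ x, (x ∈ nums.foldl altStep PySem.Set.empty ↔ (x ≠ [] ∧ x.Sublist nums ∧ x.Pairwise (· ≤ ·))) := by
  induction nums using List.reverseRecOn with
  | nil =>
    refine ⟨by simp [PySem.Set.empty], ?_⟩
    intro x
    simp only [List.foldl_nil, PySem.Set.empty, List.not_mem_nil, false_iff]
    rintro ⟨hne, hsub, -⟩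
    exact hne (List.sublist_nil.mp hsub)
  | append_singleton p num ih =>
    obtain ⟨hnd, hmem⟩ := ih
    rw [List.foldl_append] at *
    simp only [List.foldl_cons, List.foldl_nil] at *
    constructor
    · exact PySem.Set.nodup_update _ _ hnd
    · intro x
      unfold altStep
      rw [PySem.Set.mem_update]
      simp only [List.mem_cons, List.mem_map, List.mem_filter, decide_eq_true_eq]
      constructor
      · rintro (hx | hx | ⟨sub, ⟨hsb, hpred⟩, rfl⟩)
        · obtain ⟨hne, hsub, hpw⟩ := (hmem x).mp hx
          exact ⟨hne, hsub.trans (List.sublist_append_left _ _), hpw⟩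
        · subst hx
          exact ⟨by simp, List.sublist_append_right _ _, by simp⟩
        · obtain ⟨hne, hsub, hpw⟩ := (hmem sub).mp hsb
          refine ⟨by simp, hsub.append (List.Sublist.refl _), ?_⟩
          exact (pw_concat_iff sub num hne hpw).mpr hpred
      · rintro ⟨hne, hsub, hpw⟩
        rcases (sublist_concat_iff x p num).mp hsub with h2 | ⟨y, rfl, hy⟩
        · exact Or.inl ((hmem x).mpr ⟨hne, h2, hpw⟩)
        · rcases y with _ | ⟨c, y'⟩
          · right; left; simp
          · right; right
            refine ⟨c :: y', ⟨?_, ?_⟩, rfl⟩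
            · exact (hmem _).mpr ⟨by simp, hy, (List.pairwise_append.mp hpw).1⟩
            · exact (pw_concat_iff _ num (by simp) (List.pairwise_append.mp hpw).1).mp hpw

-- ===== VERDICT (by name: the statement is the Claim_ definition above) =====
theorem findSubsequences_spec : Claim_equal_findSubsequences := by
  intro nums _
  unfold Spec_findSubsequences findSubsequences findSubsequences_alt
  obtain ⟨lA, hA, hAnd, hAmem⟩ := (bt_main nums (2*(nums.length+1)+1)).1 0 [] [] (by omega) (by simp)
  obtain ⟨hBnd, hBmem⟩ := alt_inv nums
  have hinst : (fun (a b : List Int) => a.decidableLT b)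
      = (inferInstance : LinearOrder (List Int)).toDecidableLT := by
    funext a b; exact Subsingleton.elim _ _
  show PySem.List.sorted _ _ = PySem.List.sorted _ _
  rw [hinst]
  apply PySem.List.sorted_eq_sorted_of_perm _ _ _ (fun a b h => h)
  rw [hA]; simp only [List.nil_append]
  rw [List.perm_ext_iff_of_nodup hAnd (hBnd.filter _)]
  intro x
  rw [hAmem x, List.mem_filter]
  unfold ExtA
  constructor
  · rintro ⟨t, hsub, hx, hpw, hlen⟩
    have hne : x ≠ [] := by intro h; rw [h] at hlen; simp at hlen
    have hsx : x.Sublist nums := by rw [hx]; simpa using hsub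
    exact ⟨(hBmem x).mpr ⟨hne, hsx, hpw⟩, by simpa using hlen⟩
  · rintro ⟨hx, hlen⟩
    obtain ⟨-, hsub, hpw⟩ := (hBmem x).mp hx
    exact ⟨x, by simpa using hsub, by simp, hpw, by simpa using hlen⟩
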